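-- pv_equiv track=rewrite | github.com/EOued/Projet_Stade | utils/utils.py | int_to_time_periods
-- ===== SOURCE A (Python) =====
-- def int_to_time_periods(x: int, ftype: int = 0) -> list[list[int]]:
--     periods = []
--     start = None
--
--     for i in range(24):
--         if (x >> i) & 1:
--             if start is None:
--                 start = i
--         else:
--             if start is not None:
--                 periods.append([start, i, (ftype >> i - 1) & 1])
--                 start = None
--
--     if start is not None:
--         periods.append([start, 0, (ftype >> 23) & 1])
--
--     return periods
-- ===== SOURCE B (Python) =====
-- def _trailing_zeros(n: int) -> int:
--     # number of zero bits at the low end of n (n > 0)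
--     c = 0
--     while n % 2 == 0:
--         n >>= 1
--         c += 1
--     return c
--
--
-- def _trailing_ones(n: int) -> int:
--     # number of one bits at the low end of n
--     c = 0
--     while n % 2 == 1:
--         n >>= 1
--         c += 1
--     return c
--
--
-- def int_to_time_periods(x: int, ftype: int = 0) -> list[list[int]]:
--     # Strip maximal runs of set bits off the low end of the 24-bit mask by
--     # shifting it away, one loop iteration per run (no per-bit state machine).
--     m = x % (1 << 24)
--     out = []
--     base = 0
--     while m:
--         z = _trailing_zeros(m)
--         m >>= z
--         o = _trailing_ones(m)
--         m >>= o
--         s = base + z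
--         e = s + o - 1
--         out.append([s, 0 if e == 23 else e + 1, (ftype >> e) & 1])
--         base = e + 1
--     return out
-- ===== Notes on version B (the rewrite author's own statement) =====
-- stated objective: alternative
-- what changed: Replaces A's fixed 24-iteration per-bit scan with an Optional start marker by arithmetic run-stripping: B reduces x modulo 2**24 and then repeatedly shifts whole runs (trailing zeros, then trailing ones) off the low end of the integer, emitting one period per loop iteration.
import Mathlib
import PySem

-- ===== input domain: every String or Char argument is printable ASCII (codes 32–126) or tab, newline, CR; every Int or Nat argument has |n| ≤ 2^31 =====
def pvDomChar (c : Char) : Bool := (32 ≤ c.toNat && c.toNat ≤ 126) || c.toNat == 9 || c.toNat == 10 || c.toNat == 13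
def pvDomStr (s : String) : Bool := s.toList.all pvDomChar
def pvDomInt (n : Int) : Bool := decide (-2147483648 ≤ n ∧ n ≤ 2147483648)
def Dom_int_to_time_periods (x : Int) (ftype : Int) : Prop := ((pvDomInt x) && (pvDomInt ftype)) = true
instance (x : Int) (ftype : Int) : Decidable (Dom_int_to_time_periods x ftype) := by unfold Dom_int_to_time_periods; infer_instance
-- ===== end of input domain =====

-- B strips maximal runs of set bits off the low end of the 24-bit mask by shifting,
-- one iteration per run (alternative decomposition, same cost); A's per-bit state
-- machine is ported literally.

-- shared primitive: Python's (n >> i) & 1 (i is a nonnegative index in both programs)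
def pyBit (n i : Int) : Int := PySem.Int.band (n >>> i.toNat) 1

-- ===== PORT A =====
-- A's loop body: state = (periods, start)
def stepA (x ftype : Int) (st : List (List Int) × Option Int) (i : Int) :
    List (List Int) × Option Int :=
  if pyBit x i ≠ 0 then
    match st.2 with
    | none => (st.1, some i)
    | some _ => st
  else
    match st.2 with
    -- (i - 1).toNat: i ≥ 1 whenever this branch fires with start set (start is none at i = 0)
    | some s => (st.1 ++ [[s, i, pyBit ftype (i - 1)]], none)
    | none => st

def int_to_time_periods (x : Int) (ftype : Int) : List (List Int) :=
  let r := (PySem.List.pyRange 0 24 1).foldl (stepA x ftype) ([], none)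
  match r.2 with
  | some s => r.1 ++ [[s, 0, pyBit ftype 23]]
  | none => r.1

-- ===== PORT B =====
-- _trailing_zeros: the 'n ≠ 0' guard only makes the definition total (B calls it with n > 0,
-- where the Python helper terminates)
def ctzN (n : Nat) : Nat :=
  if _h : n = 0 then 0
  else if n % 2 = 0 then ctzN (n / 2) + 1 else 0
termination_by n
decreasing_by exact Nat.div_lt_self (Nat.pos_of_ne_zero _h) one_lt_two

-- _trailing_ones
def ctoN (n : Nat) : Nat :=
  if h : n % 2 = 1 then ctoN (n / 2) + 1 else 0
termination_by n
decreasing_by exact Nat.div_lt_self (by omega) one_lt_two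

-- the two facts the main loop's termination needs (cited in decreasing_by)
theorem ctzN_shift_odd (n : Nat) (h : n ≠ 0) : (n >>> ctzN n) % 2 = 1 := by
  induction n using Nat.strong_induction_on with
  | _ n ih =>
    rw [ctzN, dif_neg h]
    by_cases he : n % 2 = 0
    · rw [if_pos he, Nat.add_comm, Nat.shiftRight_add, Nat.shiftRight_one]
      exact ih (n / 2) (Nat.div_lt_self (Nat.pos_of_ne_zero h) one_lt_two) (by omega)
    · rw [if_neg he]
      simpa using (by omega : n % 2 = 1)

theorem ctoN_pos (n : Nat) (h : n % 2 = 1) : 0 < ctoN n := by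
  rw [ctoN]; simp [h]

-- B's main loop: strip one run of set bits per iteration (m is x % 2**24, a nonnegative
-- Python int, carried as a Nat)
def stripRuns (m : Nat) (base ftype : Int) : List (List Int) :=
  if h : m = 0 then []
  else
    let z := ctzN m
    let m1 := m >>> z
    let o := ctoN m1
    let m2 := m1 >>> o
    let s := base + z
    let e := s + o - 1
    [s, if e = 23 then 0 else e + 1, pyBit ftype e] :: stripRuns m2 (e + 1) ftype
termination_by m
decreasing_by
  have h1 : (m >>> ctzN m) % 2 = 1 := ctzN_shift_odd m h
  have h2 : 0 < ctoN (m >>> ctzN m) := ctoN_pos _ h1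
  have h3 : m >>> ctzN m ≠ 0 := by omega
  simp only [Nat.shiftRight_eq_div_pow] at h2 h3
  calc m >>> ctzN m >>> ctoN (m >>> ctzN m) ≤ (m >>> ctzN m) >>> 1 := by
        simp only [Nat.shiftRight_eq_div_pow]
        exact Nat.div_le_div_left (Nat.pow_le_pow_right (by omega) h2) (by positivity)
    _ < m >>> ctzN m := by
        simp only [Nat.shiftRight_eq_div_pow, pow_one]
        exact Nat.div_lt_self (Nat.pos_of_ne_zero h3) one_lt_two
    _ ≤ m := by
        simp only [Nat.shiftRight_eq_div_pow]
        exact Nat.div_le_self _ _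

def int_to_time_periods_alt (x : Int) (ftype : Int) : List (List Int) :=
  stripRuns (PySem.Int.mod x (1 <<< 24)).toNat 0 ftype

-- ===== PRECONDITION & SPEC =====
def Spec_int_to_time_periods (x : Int) (ftype : Int) (out : List (List Int)) : Prop := out = int_to_time_periods_alt x ftype
instance (x : Int) (ftype : Int) (out : List (List Int)) : Decidable (Spec_int_to_time_periods x ftype out) := by unfold Spec_int_to_time_periods; infer_instance

-- ===== CLAIM (what is proved, stated in full; the proofs are below) =====
def Claim_equal_int_to_time_periods : Prop := ∀ (x : Int) (ftype : Int), Dom_int_to_time_periods x ftype → Spec_int_to_time_periods x ftype (int_to_time_periods x ftype)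

-- ===== LEMMAS AND PROOFS =====

-- A's epilogue, as a function of the loop's final state
def finA (ftype : Int) (st : List (List Int) × Option Int) : List (List Int) :=
  match st.2 with
  | some s => st.1 ++ [[s, 0, pyBit ftype 23]]
  | none => st.1

-- pyBit is binary
theorem pyBit_binary (n i : Int) : pyBit n i = 0 ∨ pyBit n i = 1 := by
  unfold pyBit
  rw [PySem.Int.band_one]
  have h1 := PySem.Int.mod_nonneg (n >>> i.toNat) (b := 2) (by omega)
  have h2 := PySem.Int.mod_lt (n >>> i.toNat) (b := 2) (by omega)
  omega

-- bits of x % 2**24 are x's bits below 24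
theorem bits_mod (x : Int) (t : Nat) :
    (PySem.Int.mod x (1 <<< 24)).toNat.testBit t
      = (decide (t < 24) && decide (pyBit x (t : Int) = 1)) := by
  have h24 : ((1 <<< 24 : Int)) = 16777216 := by decide
  rw [h24]
  have hM : PySem.Int.mod x 16777216 = x % 16777216 := PySem.Int.mod_eq_emod_of_pos (by omega)
  have htb : ∀ (mm tt : Nat), mm.testBit tt = decide (mm / 2 ^ tt % 2 = 1) := by
    intro mm tt
    rw [show mm.testBit tt = (mm >>> tt).testBit 0 by
          simp,
        Nat.testBit_zero, Nat.shiftRight_eq_div_pow]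
  by_cases ht : t < 24
  · rw [htb]
    unfold pyBit
    rw [Int.toNat_natCast, Int.shiftRight_eq_div_pow, PySem.Int.band_one,
        PySem.Int.mod_eq_emod_of_pos (by omega : (0:Int) < 2)]
    simp only [ht, decide_true, Bool.true_and]
    rw [decide_eq_decide]
    have hMb := Int.emod_nonneg x (by omega : (16777216:Int) ≠ 0)
    have hMlt := Int.emod_lt_of_pos x (by omega : (0:Int) < 16777216)
    interval_cases t <;> (push_cast; omega)
  · have hlt : (PySem.Int.mod x 16777216).toNat < 2 ^ t := by
      have hMlt := Int.emod_lt_of_pos x (by omega : (0:Int) < 16777216)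
      have : (PySem.Int.mod x 16777216).toNat < 2 ^ 24 := by rw [hM]; omega
      have h2 : (2:Nat) ^ 24 ≤ 2 ^ t := Nat.pow_le_pow_right (by omega) (by omega)
      omega
    rw [Nat.testBit_lt_two_pow hlt]
    simp [ht]

-- ctzN: the trailing bits it counts are zero
theorem ctzN_testBit (n : Nat) (t : Nat) (ht : t < ctzN n) : n.testBit t = false := by
  induction n using Nat.strong_induction_on generalizing t with
  | _ n ih =>
    by_cases h0 : n = 0
    · subst h0; exact Nat.zero_testBit t
    rw [ctzN, dif_neg h0] at ht
    by_cases he : n % 2 = 0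
    · rw [if_pos he] at ht
      cases t with
      | zero => simp [Nat.testBit_zero]; omega
      | succ t =>
          rw [Nat.testBit_succ]
          exact ih (n / 2) (Nat.div_lt_self (Nat.pos_of_ne_zero h0) one_lt_two) t (by omega)
    · rw [if_neg he] at ht; omega

-- ctoN: the trailing bits it counts are one, and the next bit is zero
theorem ctoN_testBit_lt (n : Nat) (t : Nat) (ht : t < ctoN n) : n.testBit t = true := by
  induction n using Nat.strong_induction_on generalizing t with
  | _ n ih =>
    rw [ctoN] at ht
    by_cases he : n % 2 = 1
    · rw [dif_pos he] at ht
      cases t with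
      | zero => simp [Nat.testBit_zero]; omega
      | succ t =>
          rw [Nat.testBit_succ]
          exact ih (n / 2) (Nat.div_lt_self (by omega) one_lt_two) t (by omega)
    · rw [dif_neg he] at ht; omega

theorem ctoN_testBit_self (n : Nat) : n.testBit (ctoN n) = false := by
  induction n using Nat.strong_induction_on with
  | _ n ih =>
    rw [ctoN]
    by_cases he : n % 2 = 1
    · rw [dif_pos he, Nat.testBit_succ]
      exact ih (n / 2) (Nat.div_lt_self (by omega) one_lt_two)
    · rw [dif_neg he]
      simp [Nat.testBit_zero]; omega

-- A's loop ignores zero bits while no run is open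
theorem foldl_zeros (x ftype : Int) (k : Nat) : ∀ (j : Nat) (acc : List (List Int)),
    (∀ t, t < k → pyBit x ((j + t : Nat) : Int) = 0) →
    (PySem.List.pyRange (j : Int) ((j + k : Nat) : Int) 1).foldl (stepA x ftype) (acc, none)
      = (acc, none) := by
  induction k with
  | zero => intro j acc _; rw [PySem.List.pyRange_one_eq_nil (by simp)]; rfl
  | succ k ih =>
      intro j acc hz
      rw [PySem.List.pyRange_one_cons (by push_cast; omega)]
      rw [List.foldl_cons]
      have hb : pyBit x (j : Int) = 0 := by simpa using hz 0 (by omega)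
      have hstep : stepA x ftype (acc, none) (j : Int) = (acc, none) := by
        simp [stepA, hb]
      rw [hstep]
      have hcast : ((j : Int) + 1) = ((j + 1 : Nat) : Int) := by push_cast; ring
      have hcast2 : ((j + (k+1) : Nat) : Int) = (((j + 1) + k : Nat) : Int) := by push_cast; ring
      rw [hcast, hcast2]
      exact ih (j + 1) acc (fun t ht => by
        have := hz (t + 1) (by omega)
        have he : j + (t + 1) = j + 1 + t := by omega
        rwa [he] at this)

-- A's loop ignores one bits while a run is open
theorem foldl_ones (x ftype : Int) (k : Nat) : ∀ (j : Nat) (acc : List (List Int)) (s : Int),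
    (∀ t, t < k → pyBit x ((j + t : Nat) : Int) = 1) →
    (PySem.List.pyRange (j : Int) ((j + k : Nat) : Int) 1).foldl (stepA x ftype) (acc, some s)
      = (acc, some s) := by
  induction k with
  | zero => intro j acc s _; rw [PySem.List.pyRange_one_eq_nil (by simp)]; rfl
  | succ k ih =>
      intro j acc s ho
      rw [PySem.List.pyRange_one_cons (by push_cast; omega)]
      rw [List.foldl_cons]
      have hb : pyBit x (j : Int) = 1 := by simpa using ho 0 (by omega)
      have hstep : stepA x ftype (acc, some s) (j : Int) = (acc, some s) := by
        simp [stepA, hb]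
      rw [hstep]
      have hcast : ((j : Int) + 1) = ((j + 1 : Nat) : Int) := by push_cast; ring
      have hcast2 : ((j + (k+1) : Nat) : Int) = (((j + 1) + k : Nat) : Int) := by push_cast; ring
      rw [hcast, hcast2]
      exact ih (j + 1) acc s (fun t ht => by
        have := ho (t + 1) (by omega)
        have he : j + (t + 1) = j + 1 + t := by omega
        rwa [he] at this)

-- main invariant: if m holds exactly x's bits from position j on (up to 24),
-- then finishing A's scan from j equals acc ++ B's strip loop on m
theorem main_lemma (x ftype : Int) :
    ∀ m : Nat, ∀ j : Nat, j ≤ 24 →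
      (∀ t : Nat, m.testBit t = (decide (j + t < 24) && decide (pyBit x ((j + t : Nat) : Int) = 1))) →
      ∀ acc : List (List Int),
        finA ftype ((PySem.List.pyRange (j : Int) 24 1).foldl (stepA x ftype) (acc, none))
          = acc ++ stripRuns m (j : Int) ftype := by
  intro m
  induction m using Nat.strong_induction_on with
  | _ m ih =>
    intro j hj hbits acc
    by_cases hm : m = 0
    · -- no set bits left: A scans zeros to the end, B emits nothing
      subst hm
      rw [stripRuns, dif_pos rfl]
      have hz : ∀ t, t < 24 - j → pyBit x ((j + t : Nat) : Int) = 0 := by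
        intro t ht
        have hb := hbits t
        rw [Nat.zero_testBit] at hb
        have h1 : j + t < 24 := by omega
        rcases pyBit_binary x ((j + t : Nat) : Int) with h | h
        · exact h
        · rw [h] at hb; simp [h1] at hb
      have := foldl_zeros x ftype (24 - j) j acc hz
      rw [show ((j + (24 - j) : Nat) : Int) = 24 by push_cast; omega] at this
      rw [this]
      simp [finA]
    · -- strip the first run [j+z, j+z+o)
      set z := ctzN m with hz_def
      set m1 := m >>> z with hm1_def
      set o := ctoN m1 with ho_def
      set m2 := m1 >>> o with hm2_def
      have hodd : m1 % 2 = 1 := ctzN_shift_odd m hm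
      have ho1 : 0 < o := ctoN_pos m1 hodd
      have hbit_m1 : ∀ t, m1.testBit t = m.testBit (z + t) := fun t => Nat.testBit_shiftRight m
      have hbit_m2 : ∀ t, m2.testBit t = m.testBit (z + o + t) := by
        intro t
        rw [hm2_def, Nat.testBit_shiftRight, hbit_m1, Nat.add_assoc]
      have hones : ∀ t, t < o → m.testBit (z + t) = true := fun t ht => by
        rw [← hbit_m1]; exact ctoN_testBit_lt m1 t ht
      have hafter : m.testBit (z + o) = false := by
        have h := ctoN_testBit_self m1
        rwa [hbit_m1] at h
      have hlast := hones (o - 1) (by omega)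
      rw [hbits (z + (o - 1))] at hlast
      have hle : j + z + o ≤ 24 := by
        by_contra hc
        simp [show ¬ (j + (z + (o-1)) < 24) by omega] at hlast
      -- bit values seen by A
      have pz : ∀ t, t < z → pyBit x ((j + t : Nat) : Int) = 0 := by
        intro t ht
        have hb := hbits t
        rw [ctzN_testBit m t ht] at hb
        rcases pyBit_binary x ((j + t : Nat) : Int) with h | h
        · exact h
        · rw [h] at hb; simp [show j + t < 24 by omega] at hb
      have pon : ∀ t, t < o → pyBit x ((j + z + t : Nat) : Int) = 1 := by
        intro t ht
        have hb := hbits (z + t)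
        rw [hones t ht] at hb
        rw [show j + (z + t) = j + z + t by omega] at hb
        simp only [Bool.true_eq, Bool.and_eq_true, decide_eq_true_eq] at hb
        exact hb.2
      -- split A's range at j+z and j+z+o
      -- split A's range at j+z and at j+z+o
      rw [PySem.List.pyRange_one_append (j : Int) ((j + z : Nat) : Int) 24
            (by push_cast; omega) (by push_cast; omega),
          List.foldl_append,
          foldl_zeros x ftype z j acc pz,
          PySem.List.pyRange_one_append ((j + z : Nat) : Int) ((j + z + o : Nat) : Int) 24
            (by push_cast; omega) (by push_cast; omega),
          List.foldl_append,
          PySem.List.pyRange_one_cons (a := ((j + z : Nat) : Int)) (by push_cast; omega),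
          List.foldl_cons]
      -- the first 1-bit opens the run
      have hopen : stepA x ftype (acc, none) ((j + z : Nat) : Int)
          = (acc, some ((j + z : Nat) : Int)) := by
        have h1 := pon 0 ho1
        rw [Nat.add_zero] at h1
        push_cast at h1
        simp [stepA, h1]
      rw [hopen]
      -- the remaining o-1 one bits keep it open
      have hseg2 : (PySem.List.pyRange (((j + z : Nat) : Int) + 1) ((j + z + o : Nat) : Int) 1).foldl
          (stepA x ftype) (acc, some ((j + z : Nat) : Int)) = (acc, some ((j + z : Nat) : Int)) := by
        have hc1 : (((j + z : Nat) : Int) + 1) = ((j + z + 1 : Nat) : Int) := by push_cast; ring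
        have hc2 : ((j + z + o : Nat) : Int) = ((j + z + 1 + (o - 1) : Nat) : Int) := by
          push_cast; omega
        rw [hc1, hc2]
        exact foldl_ones x ftype (o - 1) (j + z + 1) acc _ (fun t ht => by
          have := pon (t + 1) (by omega)
          rwa [show j + z + (t + 1) = j + z + 1 + t by omega] at this)
      rw [hseg2]
      -- unfold one step of B
      have hstrip : stripRuns m ((j : Int)) ftype
          = [(j : Int) + (z : Nat), if (j : Int) + (z : Nat) + (o : Nat) - 1 = 23 then 0
               else (j : Int) + (z : Nat) + (o : Nat) - 1 + 1,
             pyBit ftype ((j : Int) + (z : Nat) + (o : Nat) - 1)]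
            :: stripRuns m2 ((j : Int) + (z : Nat) + (o : Nat) - 1 + 1) ftype := by
        rw [stripRuns, dif_neg hm]
      rw [hstrip]
      -- m2 carries exactly the bits from j+z+o on
      have hbits2 : ∀ t : Nat,
          m2.testBit t = (decide (j + z + o + t < 24) && decide (pyBit x ((j + z + o + t : Nat) : Int) = 1)) := by
        intro t
        rw [hbit_m2, hbits (z + o + t), show j + (z + o + t) = j + z + o + t by omega]
      rcases Nat.lt_or_ge (j + z + o) 24 with hlt | hge
      · -- run ends before bit 23: A closes it at index j+z+o
        have hb0 : pyBit x ((j + z + o : Nat) : Int) = 0 := by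
          have hb := hbits (z + o)
          rw [hafter, show j + (z + o) = j + z + o by omega] at hb
          rcases pyBit_binary x ((j + z + o : Nat) : Int) with h | h
          · exact h
          · rw [h] at hb; simp [hlt] at hb
        rw [PySem.List.pyRange_one_cons (a := ((j + z + o : Nat) : Int)) (by push_cast; omega),
            List.foldl_cons]
        have hb0' : pyBit x ((j : Int) + (z : Nat) + (o : Nat)) = 0 := by
          push_cast at hb0; exact hb0
        have hclose : stepA x ftype (acc, some ((j + z : Nat) : Int)) ((j + z + o : Nat) : Int)
            = (acc ++ [[((j + z : Nat) : Int), ((j + z + o : Nat) : Int),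
                pyBit ftype (((j + z + o : Nat) : Int) - 1)]], none) := by
          simp [stepA, hb0']
        rw [hclose]
        -- IH at j' = j+z+o, after peeling its first (zero-bit) index
        have hm2lt : m2 < m := by
          have h1 : m1 ≠ 0 := by omega
          have e1 : m2 ≤ m1 / 2 := by
            rw [hm2_def, Nat.shiftRight_eq_div_pow]
            exact Nat.div_le_div_left
              (by simpa using Nat.pow_le_pow_right (by omega : 1 ≤ 2) ho1) (by positivity)
          have e2 : m1 ≤ m := by
            rw [hm1_def, Nat.shiftRight_eq_div_pow]
            exact Nat.div_le_self _ _
          omega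
        have hIH := ih m2 hm2lt (j + z + o) (by omega) hbits2
          (acc ++ [[((j + z : Nat) : Int), ((j + z + o : Nat) : Int),
                pyBit ftype (((j + z + o : Nat) : Int) - 1)]])
        rw [PySem.List.pyRange_one_cons (a := ((j + z + o : Nat) : Int)) (by push_cast; omega),
            List.foldl_cons] at hIH
        have hskip : stepA x ftype
            (acc ++ [[((j + z : Nat) : Int), ((j + z + o : Nat) : Int),
                pyBit ftype (((j + z + o : Nat) : Int) - 1)]], none) ((j + z + o : Nat) : Int)
            = (acc ++ [[((j + z : Nat) : Int), ((j + z + o : Nat) : Int),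
                pyBit ftype (((j + z + o : Nat) : Int) - 1)]], none) := by
          simp [stepA, hb0']
        rw [hskip] at hIH
        rw [hIH]
        -- both sides are acc ++ (run element :: strip of the rest)
        have he23 : ¬ ((j : Int) + (z : Nat) + (o : Nat) - 1 = 23) := by omega
        rw [if_neg he23]
        simp only [List.append_assoc, List.singleton_append]
        push_cast
        ring_nf
      · -- run reaches bit 23: A's epilogue closes it with end 0
        have h24 : j + z + o = 24 := by omega
        rw [PySem.List.pyRange_one_eq_nil (a := ((j + z + o : Nat) : Int)) (by push_cast; omega),
            List.foldl_nil]
        have hm2z : m2 = 0 := by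
          apply Nat.eq_of_testBit_eq
          intro t
          rw [hbits2, Nat.zero_testBit]
          simp [show ¬ (j + z + o + t < 24) by omega]
        have hnil : stripRuns m2 ((j : Int) + (z : Nat) + (o : Nat) - 1 + 1) ftype = [] := by
          rw [hm2z, stripRuns, dif_pos rfl]
        rw [hnil]
        have he23 : ((j : Int) + (z : Nat) + (o : Nat) - 1 = 23) := by omega
        rw [if_pos he23]
        simp only [finA]
        rw [he23]
        push_cast
        ring_nf

-- ===== VERDICT (by name: the statement is the Claim_ definition above) =====
theorem int_to_time_periods_spec : Claim_equal_int_to_time_periods := by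
  intro x ftype _
  unfold Spec_int_to_time_periods int_to_time_periods int_to_time_periods_alt
  have h := main_lemma x ftype (PySem.Int.mod x (1 <<< 24)).toNat 0 (by omega)
    (by intro t; simpa using bits_mod x t) []
  simp only [Nat.cast_zero, List.nil_append] at h
  rw [← h]
  rfl
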